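-- pv_equiv track=rewrite | github.com/tonyisup/t3-from | analyze_message_roles.py | analyze_message_roles
-- ===== SOURCE A (Python) =====
-- from typing import Dict, List
-- from collections import defaultdict
--
-- def analyze_message_roles(messages: List[Dict]) -> Dict:
--     """Analyze message roles and their counts."""
--     role_counts = defaultdict(int)
--     role_thread_counts = defaultdict(set)  # Track unique threads per role
--
--     for message in messages:
--         role = message.get("role", "unknown")
--         thread_id = message.get("threadId")
--
--         role_counts[role] += 1
--         if thread_id:
--             role_thread_counts[role].add(thread_id)
--
--     return {
--         "role_counts": dict(role_counts),
--         "role_thread_counts": {role: len(threads) for role, threads in role_thread_counts.items()}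
--     }
-- ===== SOURCE B (Python) =====
-- def analyze_message_roles(messages):
--     """Analyze message roles and their counts."""
--     roles = [m.get("role", "unknown") for m in messages]
--     pairs = [(r, m.get("threadId")) for r, m in zip(roles, messages) if m.get("threadId")]
--     return {
--         "role_counts": {r: roles.count(r) for r in dict.fromkeys(roles)},
--         "role_thread_counts": {r: len({t for rr, t in pairs if rr == r})
--                                for r in dict.fromkeys(r for r, _ in pairs)},
--     }
-- ===== Notes on version B (the rewrite author's own statement) =====
-- stated objective: alternative
-- what changed: Replaces A's single accumulate-while-scanning loop over two defaultdicts by per-distinct-role rescans: dedup the role list, then compute each role's count with list.count and its unique truthy threadIds with a set comprehension over the pre-filtered pairs.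
import Mathlib
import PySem

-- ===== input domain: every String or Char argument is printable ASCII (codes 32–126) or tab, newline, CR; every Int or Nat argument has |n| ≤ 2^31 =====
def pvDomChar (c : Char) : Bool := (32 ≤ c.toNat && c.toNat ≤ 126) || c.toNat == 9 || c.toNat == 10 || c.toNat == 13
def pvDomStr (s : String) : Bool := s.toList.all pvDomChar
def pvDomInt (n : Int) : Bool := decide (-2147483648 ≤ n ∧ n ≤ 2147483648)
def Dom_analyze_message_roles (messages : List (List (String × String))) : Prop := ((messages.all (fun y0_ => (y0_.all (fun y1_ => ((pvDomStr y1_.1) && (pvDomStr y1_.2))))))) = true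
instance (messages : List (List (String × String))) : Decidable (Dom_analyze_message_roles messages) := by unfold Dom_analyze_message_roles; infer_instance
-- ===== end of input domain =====

-- B replaces A's single accumulate-while-scanning loop over two defaultdicts by per-distinct-role
-- rescans (dedup the roles, then list.count / a set comprehension per role); objective: alternative.

-- message.get(k) on a message dict (assoc list, first match)
def msgGet? (m : List (String × String)) (k : String) : Option String :=
  (m.find? (fun p => p.1 == k)).map (·.2)

-- ===== PORT A =====
def analyze_message_roles (messages : List (List (String × String))) : List (String × List (String × Int)) :=
  let st := messages.foldl
    (fun (st : PySem.Dict String Int × PySem.Dict String (PySem.Set String)) message =>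
      let role := (msgGet? message "role").getD "unknown"
      let thread_id := msgGet? message "threadId"
      let rc := st.1.modify role 0 (· + 1)                       -- role_counts[role] += 1 (defaultdict(int))
      let rtc := match thread_id with                            -- if thread_id: role_thread_counts[role].add(thread_id)
        | some t => if t ≠ "" then st.2.modify role PySem.Set.empty (fun s => PySem.Set.add s t) else st.2
        | none => st.2
      (rc, rtc))
    (PySem.Dict.empty, PySem.Dict.empty)
  [("role_counts", st.1.items),
   ("role_thread_counts", st.2.items.map (fun p => (p.1, (p.2.length : Int))))]

-- ===== PORT B =====
def pvRoleOf (m : List (String × String)) : String := (msgGet? m "role").getD "unknown"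

def analyze_message_roles_alt (messages : List (List (String × String))) : List (String × List (String × Int)) :=
  let roles := messages.map pvRoleOf                             -- [m.get("role", "unknown") for m in messages]
  let pairs := messages.filterMap (fun m =>                      -- [(r, m.get("threadId")) for r, m in zip(roles, messages) if m.get("threadId")]
      match msgGet? m "threadId" with
      | some t => if t ≠ "" then some (pvRoleOf m, t) else none
      | none => none)
  [("role_counts",                                               -- {r: roles.count(r) for r in dict.fromkeys(roles)}
    (PySem.List.dedup roles).map (fun r => (r, (roles.count r : Int)))),
   ("role_thread_counts",                                        -- {r: len({t for rr, t in pairs if rr == r}) for r in dict.fromkeys(r for r, _ in pairs)}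
    (PySem.List.dedup (pairs.map Prod.fst)).map (fun r =>
      (r, ((PySem.Set.ofList ((pairs.filter (fun p => p.1 == r)).map Prod.snd)).length : Int))))]

-- ===== PRECONDITION & SPEC =====
def Spec_analyze_message_roles (messages : List (List (String × String))) (out : List (String × List (String × Int))) : Prop := out = analyze_message_roles_alt messages
instance (messages : List (List (String × String))) (out : List (String × List (String × Int))) : Decidable (Spec_analyze_message_roles messages out) := by unfold Spec_analyze_message_roles; infer_instance

-- ===== CLAIM (what is proved, stated in full; the proofs are below) =====
def Claim_equal_analyze_message_roles : Prop := ∀ (messages : List (List (String × String))), Dom_analyze_message_roles messages → Spec_analyze_message_roles messages (analyze_message_roles messages)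

-- ===== LEMMAS AND PROOFS =====

-- A's paired fold splits into a role-count pass and a thread-set pass over the filtered pairs
theorem fold_split (messages : List (List (String × String)))
    (d1 : PySem.Dict String Int) (d2 : PySem.Dict String (PySem.Set String)) :
    messages.foldl
      (fun (st : PySem.Dict String Int × PySem.Dict String (PySem.Set String)) message =>
        let role := (msgGet? message "role").getD "unknown"
        let thread_id := msgGet? message "threadId"
        let rc := st.1.modify role 0 (· + 1)
        let rtc := match thread_id with
          | some t => if t ≠ "" then st.2.modify role PySem.Set.empty (fun s => PySem.Set.add s t) else st.2
          | none => st.2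
        (rc, rtc)) (d1, d2)
    = ((messages.map pvRoleOf).foldl (fun d x => d.modify x 0 (· + 1)) d1,
       (messages.filterMap (fun m =>
          match msgGet? m "threadId" with
          | some t => if t ≠ "" then some (pvRoleOf m, t) else none
          | none => none)).foldl
         (fun d p => d.modify p.1 PySem.Set.empty (fun s => PySem.Set.add s p.2)) d2) := by
  induction messages generalizing d1 d2 with
  | nil => rfl
  | cons m t ih =>
    simp only [List.foldl_cons, List.map_cons, List.filterMap_cons]
    cases htid : msgGet? m "threadId" with
    | none => simpa [pvRoleOf] using ih _ _
    | some s =>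
      by_cases hs : s ≠ ""
      · simp only [if_pos hs]
        simpa [pvRoleOf, hs] using ih _ _
      · simp only [if_neg hs]
        simp only [Ne, not_not] at hs
        simpa [pvRoleOf, hs] using ih _ _

-- the value at key c of A's thread-set fold is the set of c's values, in order
theorem getD_thread_fold (l : List (String × String)) (d : PySem.Dict String (PySem.Set String)) (c : String) :
    (l.foldl (fun d p => d.modify p.1 PySem.Set.empty (fun s => PySem.Set.add s p.2)) d).getD c PySem.Set.empty
    = PySem.Set.update (d.getD c PySem.Set.empty) ((l.filter (fun p => p.1 == c)).map Prod.snd) := by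
  induction l generalizing d with
  | nil => simp [PySem.Set.update]
  | cons p t ih =>
    simp only [List.foldl_cons, List.filter_cons]
    rw [ih, PySem.Dict.getD_modify]
    by_cases h : p.1 = c
    · simp [h, PySem.Set.update]
    · have hb : (p.1 == c) = false := by simp [h]
      rw [if_neg (Ne.symm h), hb]
      simp

-- items of A's thread-set fold are exactly B's dedup-then-collect dictionary
theorem thread_items (pairs : List (String × String)) :
    (pairs.foldl (fun d p => d.modify p.1 PySem.Set.empty (fun s => PySem.Set.add s p.2)) PySem.Dict.empty).items
    = (PySem.Set.ofList (pairs.map Prod.fst)).map (fun r =>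
        (r, PySem.Set.ofList ((pairs.filter (fun p => p.1 == r)).map Prod.snd))) := by
  have hnd : (pairs.foldl (fun d p => d.modify p.1 PySem.Set.empty (fun s => PySem.Set.add s p.2)) PySem.Dict.empty).keys.Nodup :=
    PySem.Dict.nodup_keys_foldl_modify_key pairs Prod.fst PySem.Set.empty
      (fun _ p s => PySem.Set.add s p.2) PySem.Dict.empty (by simp [PySem.Dict.keys_empty])
  rw [PySem.Dict.items_eq_map_keys _ hnd PySem.Set.empty]
  rw [PySem.Dict.keys_foldl_modify_key pairs Prod.fst PySem.Set.empty
      (fun _ p s => PySem.Set.add s p.2) PySem.Dict.empty]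
  simp only [PySem.Dict.keys_empty]
  apply List.map_congr_left
  intro r _
  rw [getD_thread_fold]
  simp [PySem.Dict.getD_empty, PySem.Set.ofList_eq_foldl, PySem.Set.update]

-- ===== VERDICT (by name: the statement is the Claim_ definition above) =====
theorem analyze_message_roles_spec : Claim_equal_analyze_message_roles := by
  intro messages _
  unfold Spec_analyze_message_roles analyze_message_roles analyze_message_roles_alt
  simp only [fold_split, thread_items, PySem.List.dedup_eq_ofList]
  rw [show (fun d x => PySem.Dict.modify d x 0 (· + 1)) = (fun (d : PySem.Dict String Int) x => d.modify x 0 (· + 1)) from rfl]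
  rw [← PySem.Dict.counter_eq_foldl, PySem.Dict.items_counter]
  simp [List.map_map, Function.comp]
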